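-- pv_equiv track=rewrite | github.com/bougimax/internship_genova | code/visualization/visualizer.py | get_edges_from_faces
-- ===== SOURCE A (Python) =====
-- def get_edges_from_faces(faces):
--     seen_edges = set()
--     edges = []
--     for f in faces:
--         n_vertices_faces = len(f)
--         for i in range(n_vertices_faces):
--             if tuple(sorted([f[i], f[(i + 1) % n_vertices_faces]])) not in seen_edges:
--                 edges.append(tuple(sorted([f[i], f[(i + 1) % n_vertices_faces]])))
--                 seen_edges.add(tuple(sorted([f[i], f[(i + 1) % n_vertices_faces]])))
--     return edges
-- ===== SOURCE B (Python) =====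
-- def get_edges_from_faces(faces):
--     all_edges = []
--     for f in faces:
--         for a, b in zip(f, f[1:] + f[:1]):
--             all_edges.append(tuple(sorted((a, b))))
--     edges = []
--     rest = all_edges
--     while rest:
--         head = rest[0]
--         edges.append(head)
--         rest = [e for e in rest[1:] if e != head]
--     return edges
-- ===== Notes on version B (the rewrite author's own statement) =====
-- stated objective: alternative
-- what changed: B generates each face's edges by zipping the face with its rotation (zip(f, f[1:]+f[:1]), no index arithmetic or modular indexing), then deduplicates with a sieve-style while loop that repeatedly takes the head and filters its duplicates out of the remainder, instead of A's index loop with a seen-set guard.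
import Mathlib
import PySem

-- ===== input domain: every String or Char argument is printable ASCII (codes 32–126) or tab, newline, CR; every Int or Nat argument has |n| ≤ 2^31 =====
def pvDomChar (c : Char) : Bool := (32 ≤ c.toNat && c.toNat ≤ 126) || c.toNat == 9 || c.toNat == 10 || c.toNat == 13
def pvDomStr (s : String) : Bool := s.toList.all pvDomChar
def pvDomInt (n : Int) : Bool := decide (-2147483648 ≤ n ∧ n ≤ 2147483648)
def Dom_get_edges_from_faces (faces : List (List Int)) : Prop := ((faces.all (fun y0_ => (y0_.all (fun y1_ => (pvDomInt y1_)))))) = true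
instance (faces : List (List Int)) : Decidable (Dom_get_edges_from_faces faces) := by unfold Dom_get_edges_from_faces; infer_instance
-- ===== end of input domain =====

-- B replaces A's index-loop with seen-set guard by zip-rotation edge generation followed
-- by a repeated-filter (sieve) deduplication pass — no index arithmetic, no seen set.

-- ===== PORT A =====
-- tuple(sorted([a, b])) / tuple(sorted((a, b))): the edge key both Pythons use verbatim
def pvEdgeKey (a b : Int) : Int × Int :=
  match PySem.List.sorted [a, b] (fun x => x) false with
  | [x, y] => (x, y)
  | _ => (a, b)  -- unreachable: sorted of a 2-list has 2 elements

def get_edges_from_faces (faces : List (List Int)) : List (Int × Int) :=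
  (faces.foldl
    (fun (st : PySem.Set (Int × Int) × List (Int × Int)) f =>
      let n : Int := (f.length : Int)
      (PySem.List.pyRange 0 n 1).foldl
        (fun st i =>
          -- f[i] and f[(i+1) % n]: i ∈ range(n) is always in range, so pyGetD is exact here
          let e := pvEdgeKey (PySem.List.pyGetD f i 0)
                             (PySem.List.pyGetD f (PySem.Int.mod (i + 1) n) 0)
          if PySem.Set.contains st.1 e then st
          else (PySem.Set.add st.1 e, st.2 ++ [e]))
        st)
    (PySem.Set.empty, [])).2

-- ===== PORT B =====
-- the while-loop: pull the head, append it, filter it out of the rest, repeat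
def pvSieve (l : List (Int × Int)) : List (Int × Int) :=
  match l with
  | [] => []
  | h :: t => h :: pvSieve (t.filter (fun e => !(e == h)))
termination_by l.length
decreasing_by
  have h1 := List.length_filter_le (fun (x : {x // x ∈ t}) => !(x.1 == h)) t.attach
  simp at h1 ⊢
  omega

def get_edges_from_faces_alt (faces : List (List Int)) : List (Int × Int) :=
  let all_edges := faces.foldl
    (fun (acc : List (Int × Int)) f =>
      -- zip(f, f[1:] + f[:1])
      (f.zip (PySem.List.slice f (some 1) none ++ PySem.List.slice f none (some 1))).foldl
        (fun acc ab => acc ++ [pvEdgeKey ab.1 ab.2]) acc)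
    []
  pvSieve all_edges

-- ===== PRECONDITION & SPEC =====
def Spec_get_edges_from_faces (faces : List (List Int)) (out : List (Int × Int)) : Prop := out = get_edges_from_faces_alt faces
instance (faces : List (List Int)) (out : List (Int × Int)) : Decidable (Spec_get_edges_from_faces faces out) := by unfold Spec_get_edges_from_faces; infer_instance

-- ===== CLAIM (what is proved, stated in full; the proofs are below) =====
def Claim_equal_get_edges_from_faces : Prop := ∀ (faces : List (List Int)), Dom_get_edges_from_faces faces → Spec_get_edges_from_faces faces (get_edges_from_faces faces)

-- ===== LEMMAS AND PROOFS =====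

-- the edge produced at index i of face f, and the list of edges of one face
def pvEdge (f : List Int) (i : Int) : Int × Int :=
  pvEdgeKey (PySem.List.pyGetD f i 0)
            (PySem.List.pyGetD f (PySem.Int.mod (i + 1) (f.length : Int)) 0)

def pvE (f : List Int) : List (Int × Int) :=
  (PySem.List.pyRange 0 (f.length : Int) 1).map (pvEdge f)

-- A's loop body, abstracted over the edge value
def pvStepA (st : PySem.Set (Int × Int) × List (Int × Int)) (e : Int × Int) :
    PySem.Set (Int × Int) × List (Int × Int) :=
  if PySem.Set.contains st.1 e then st else (PySem.Set.add st.1 e, st.2 ++ [e])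

-- A's seen-set always equals its edges list, and both are the Set.add fold
theorem pvStepA_fold (L : List (Int × Int)) :
    ∀ s : PySem.Set (Int × Int),
      L.foldl pvStepA (s, s) = (L.foldl PySem.Set.add s, L.foldl PySem.Set.add s) := by
  induction L with
  | nil => intro s; rfl
  | cons e t ih =>
    intro s
    by_cases h : e ∈ s <;> simp [pvStepA, PySem.Set.add, h, ih]

-- A's whole double loop, from any state with seen = edges = s
theorem pvFoldA (faces : List (List Int)) :
    ∀ s : PySem.Set (Int × Int),
      faces.foldl
        (fun (st : PySem.Set (Int × Int) × List (Int × Int)) f =>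
          let n : Int := (f.length : Int)
          (PySem.List.pyRange 0 n 1).foldl
            (fun st i =>
              let e := pvEdgeKey (PySem.List.pyGetD f i 0)
                                 (PySem.List.pyGetD f (PySem.Int.mod (i + 1) n) 0)
              if PySem.Set.contains st.1 e then st
              else (PySem.Set.add st.1 e, st.2 ++ [e]))
            st)
        (s, s)
      = ((faces.flatMap pvE).foldl PySem.Set.add s,
         (faces.flatMap pvE).foldl PySem.Set.add s) := by
  induction faces with
  | nil => intro s; rfl
  | cons f t ih =>
    intro s
    have hinner :
        (PySem.List.pyRange 0 (f.length : Int) 1).foldl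
          (fun st i =>
            let e := pvEdgeKey (PySem.List.pyGetD f i 0)
                               (PySem.List.pyGetD f (PySem.Int.mod (i + 1) (f.length : Int)) 0)
            if PySem.Set.contains st.1 e then st
            else (PySem.Set.add st.1 e, st.2 ++ [e]))
          (s, s)
        = ((pvE f).foldl PySem.Set.add s, (pvE f).foldl PySem.Set.add s) := by
      rw [← pvStepA_fold]
      simp [pvE, List.foldl_map, pvStepA, pvEdge]
    simp only [List.foldl_cons, List.flatMap_cons]
    rw [hinner, ih, List.foldl_append]

-- one face: the zip-rotation edge list equals the index-loop edge list
theorem pvZipE (f : List Int) :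
    (f.zip (f.drop 1 ++ f.take 1)).map (fun ab => pvEdgeKey ab.1 ab.2) = pvE f := by
  apply List.ext_getElem
  · simp [pvE, PySem.List.length_pyRange_one]
    omega
  · intro k h1 h2
    have hn : k < f.length := by
      simp at h1; omega
    simp only [List.getElem_map, List.getElem_zip, pvE, PySem.List.getElem_pyRange_one,
      zero_add, pvEdge]
    have hget1 : PySem.List.pyGetD f (k : Int) 0 = f[k] := by
      rw [PySem.List.pyGetD_eq_getElem f 0 (by omega) (by exact_mod_cast hn)]
      simp
    have hmod : PySem.Int.mod ((k : Int) + 1) (f.length : Int)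
        = if k + 1 < f.length then ((k + 1 : Nat) : Int) else 0 := by
      have hkl : (k : Int) < (f.length : Int) := by exact_mod_cast hn
      simp only [PySem.Int.mod]
      rw [Int.fmod_eq_emod]
      rw [if_pos (Or.inl (by positivity))]
      by_cases hlt : k + 1 < f.length
      · rw [if_pos hlt, Int.emod_eq_of_lt (by omega) (by exact_mod_cast hlt)]
        push_cast; ring
      · rw [if_neg hlt]
        have hEq : (k : Int) + 1 = (f.length : Int) := by
          have : ¬ ((k : Int) + 1 < (f.length : Int)) := by exact_mod_cast hlt
          omega
        rw [hEq, Int.emod_self]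
        simp
    rw [hget1, hmod]
    by_cases hlt : k + 1 < f.length
    · rw [if_pos hlt]
      have hget2 : PySem.List.pyGetD f (((k + 1 : Nat)) : Int) 0 = f[k + 1] := by
        rw [PySem.List.pyGetD_eq_getElem f 0 (by omega) (by exact_mod_cast hlt)]
        simp
      rw [hget2, List.getElem_append_left (by simp; omega)]
      rw [List.getElem_drop]
      have hcomm : 1 + k = k + 1 := Nat.add_comm 1 k
      simp only [hcomm]
    · rw [if_neg hlt]
      have hget0 : PySem.List.pyGetD f (0 : Int) 0 = f[0] := by
        rw [PySem.List.pyGetD_eq_getElem f 0 (by omega) (by exact_mod_cast Nat.lt_of_le_of_lt (Nat.zero_le k) hn)]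
        simp
      rw [hget0, List.getElem_append_right (by simp; omega)]
      rw [List.getElem_take]
      have hz : k - (f.drop 1).length = 0 := by simp; omega
      simp only [hz]

-- B's generation pass builds the flat list of all edges
theorem pvFoldB (faces : List (List Int)) :
    ∀ acc : List (Int × Int),
      faces.foldl
        (fun (acc : List (Int × Int)) f =>
          (f.zip (PySem.List.slice f (some 1) none ++ PySem.List.slice f none (some 1))).foldl
            (fun acc ab => acc ++ [pvEdgeKey ab.1 ab.2]) acc)
        acc
      = acc ++ faces.flatMap pvE := by
  induction faces with
  | nil => intro acc; simp
  | cons f t ih =>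
    intro acc
    simp only [List.foldl_cons, List.flatMap_cons]
    rw [PySem.List.foldl_append_singleton_eq_map, ih]
    have h1 : PySem.List.slice f (some 1) none = f.drop 1 := by
      have := PySem.List.slice_from_natCast f 1
      simpa using this
    have h2 : PySem.List.slice f none (some 1) = f.take 1 := by
      have := PySem.List.slice_to_natCast f 1
      simpa using this
    rw [h1, h2, pvZipE, List.append_assoc]

-- filtering commutes with Set.add
theorem pvFilterAdd (s : PySem.Set (Int × Int)) (x : Int × Int) (p : Int × Int → Bool) :
    (PySem.Set.add s x).filter p
      = if p x then PySem.Set.add (s.filter p) x else s.filter p := by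
  by_cases hc : x ∈ s <;> by_cases hp : p x = true <;>
    simp [PySem.Set.add, PySem.Set.contains, hc, hp, List.filter_append, List.mem_filter]

-- filtering commutes with set-of-list
theorem pvOfListFilter (t : List (Int × Int)) (p : Int × Int → Bool) :
    PySem.Set.ofList (t.filter p) = (PySem.Set.ofList t).filter p := by
  induction t using List.reverseRecOn with
  | nil => rfl
  | append_singleton xs x ih =>
    by_cases hp : p x = true
    · have hx : List.filter p [x] = [x] := by simp [hp]
      rw [List.filter_append, hx, PySem.Set.ofList_append_singleton, ih,
        PySem.Set.ofList_append_singleton, pvFilterAdd, if_pos hp]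
    · have hx : List.filter p [x] = [] := by simp [hp]
      rw [List.filter_append, hx, List.append_nil, ih,
        PySem.Set.ofList_append_singleton, pvFilterAdd, if_neg hp]

-- the sieve computes first-occurrence deduplication
theorem pvSieve_fuel (n : Nat) :
    ∀ l : List (Int × Int), l.length ≤ n → pvSieve l = PySem.Set.ofList l := by
  induction n with
  | zero =>
    intro l hl
    have : l = [] := List.eq_nil_of_length_eq_zero (Nat.le_zero.mp hl)
    subst this
    rw [pvSieve]
    rfl
  | succ n ih =>
    intro l hl
    match l with
    | [] => rw [pvSieve]; rfl
    | h :: t =>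
      rw [pvSieve, ih (t.filter (fun e => !(e == h)))
        (le_trans (List.length_filter_le _ _) (by simpa using hl)),
        pvOfListFilter, PySem.Set.ofList_cons]
      rfl

theorem pvSieve_eq_ofList (l : List (Int × Int)) : pvSieve l = PySem.Set.ofList l :=
  pvSieve_fuel l.length l (le_refl _)

-- ===== VERDICT (by name: the statement is the Claim_ definition above) =====
theorem get_edges_from_faces_spec : Claim_equal_get_edges_from_faces := by
  intro faces _
  show get_edges_from_faces faces = get_edges_from_faces_alt faces
  unfold get_edges_from_faces get_edges_from_faces_alt
  rw [pvFoldB, pvSieve_eq_ofList]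
  have h := pvFoldA faces PySem.Set.empty
  simp only [PySem.Set.empty] at h ⊢
  rw [h]
  simp [PySem.Set.ofList_eq_foldl]
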